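-- pv_equiv track=rewrite | github.com/GordonL1/portfolio | USACO_Bronze/Blocked Pasture 2/billboard.py | findlongesthorizontalside
-- ===== SOURCE A (Python) =====
-- def findfirstpos(ls):
--     for i in range(len(ls)):
--         if ls[i] == 1:
--             return i
--
-- def findlastpos(ls):
--     for i in range(len(ls)-1,-1,-1):
--         if ls[i] == 1:
--             return i
--
-- def findlongesthorizontalside(lsols):
--     m = 0
--     for ls in lsols:
--         if sum(ls) != 0:
--             s = findlastpos(ls)-findfirstpos(ls)+1
--             if s>m:
--                 m=s
--     return m
-- ===== SOURCE B (Python) =====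
-- def findlongesthorizontalside(lsols):
--     m = 0
--     for ls in lsols:
--         total = 0
--         first = None
--         last = None
--         for i, x in enumerate(ls):
--             total += x
--             if x == 1:
--                 if first is None:
--                     first = i
--                 last = i
--         if total != 0:
--             s = last - first + 1
--             if s > m:
--                 m = s
--     return m
-- ===== Notes on version B (the rewrite author's own statement) =====
-- stated objective: simpler
-- what changed: Replaces the two index-scanning helper functions and the separate sum() pass (three traversals per row) by a single enumerate pass per row that accumulates the sum and tracks the first and last index of a 1 together.
import Mathlib
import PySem

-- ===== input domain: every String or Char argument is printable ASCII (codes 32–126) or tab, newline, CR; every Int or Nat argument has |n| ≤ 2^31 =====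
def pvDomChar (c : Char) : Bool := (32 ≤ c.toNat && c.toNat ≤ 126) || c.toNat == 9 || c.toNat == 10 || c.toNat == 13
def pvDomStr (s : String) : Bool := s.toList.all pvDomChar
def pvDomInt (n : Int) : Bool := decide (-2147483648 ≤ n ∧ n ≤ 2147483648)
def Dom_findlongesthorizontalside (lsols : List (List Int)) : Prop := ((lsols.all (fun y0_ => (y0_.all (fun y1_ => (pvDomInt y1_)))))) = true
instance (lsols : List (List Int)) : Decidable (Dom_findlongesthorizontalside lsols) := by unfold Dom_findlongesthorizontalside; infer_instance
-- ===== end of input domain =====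

-- B merges A's three per-row passes (sum() plus two index-scanning helpers) into one
-- enumerate pass; objective: simpler. Return-value equivalence on Pre_ (both raise outside it).

-- ===== PORT A =====
-- helper findfirstpos: 'for i in range(len(ls)): if ls[i] == 1: return i' (returns None if no 1)
def findfirstpos (ls : List Int) : Option Int :=
  (PySem.List.pyRange 0 (ls.length : Int) 1).findSome?
    (fun i => if PySem.List.pyGetD ls i 0 = 1 then some i else none)

-- helper findlastpos: 'for i in range(len(ls)-1, -1, -1): if ls[i] == 1: return i'
def findlastpos (ls : List Int) : Option Int :=
  (PySem.List.pyRange ((ls.length : Int) - 1) (-1) (-1)).findSome?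
    (fun i => if PySem.List.pyGetD ls i 0 = 1 then some i else none)

-- 'findlastpos(ls) - findfirstpos(ls) + 1': on Pre_ both options are some; .getD 0 stands in
-- for Python's None arithmetic (Python raises TypeError there, excluded by Pre_).
def findlongesthorizontalside (lsols : List (List Int)) : Int :=
  lsols.foldl
    (fun m ls =>
      if ls.sum ≠ 0 then
        let s := (findlastpos ls).getD 0 - (findfirstpos ls).getD 0 + 1
        if s > m then s else m
      else m) 0

-- ===== PORT B =====
-- single enumerate pass per row: state (total, first, last); then the same 'total != 0' gate.
def findlongesthorizontalside_alt (lsols : List (List Int)) : Int :=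
  lsols.foldl
    (fun m ls =>
      let st := (PySem.List.enumerate ls 0).foldl
        (fun (st : Int × Option Int × Option Int) (ix : Int × Int) =>
          ( st.1 + ix.2,
            if ix.2 = 1 ∧ st.2.1 = none then some ix.1 else st.2.1,
            if ix.2 = 1 then some ix.1 else st.2.2 ))
        (0, none, none)
      if st.1 ≠ 0 then
        let s := st.2.2.getD 0 - st.2.1.getD 0 + 1
        if s > m then s else m
      else m) 0

-- ===== PRECONDITION & SPEC =====
-- Pre_ excludes exactly the inputs on which A raises TypeError: a row whose sum is nonzero
-- but which contains no 1 makes findfirstpos/findlastpos return None and 'None - None' raise.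
def Pre_findlongesthorizontalside (lsols : List (List Int)) : Prop :=
  ∀ ls ∈ lsols, ls.sum ≠ 0 → (1 : Int) ∈ ls
instance (lsols : List (List Int)) : Decidable (Pre_findlongesthorizontalside lsols) := by
  unfold Pre_findlongesthorizontalside; infer_instance

def pvWitness_findlongesthorizontalside : List (List Int) := [[0, 1, 1, 0], [1, 0, 0, 1], [0, 0, 0, 0]]

def Spec_findlongesthorizontalside (lsols : List (List Int)) (out : Int) : Prop := out = findlongesthorizontalside_alt lsols
instance (lsols : List (List Int)) (out : Int) : Decidable (Spec_findlongesthorizontalside lsols out) := by unfold Spec_findlongesthorizontalside; infer_instance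

-- ===== CLAIM (what is proved, stated in full; the proofs are below) =====
def Claim_equal_findlongesthorizontalside : Prop := ∀ (lsols : List (List Int)), Dom_findlongesthorizontalside lsols → Pre_findlongesthorizontalside lsols → Spec_findlongesthorizontalside lsols (findlongesthorizontalside lsols)

-- ===== LEMMAS AND PROOFS =====

-- index of the first 1 in a list (proof-side specification)
def firstOne? : List Int → Option Nat
  | [] => none
  | x :: xs => if x = 1 then some 0 else (firstOne? xs).map (· + 1)

-- index of the last 1 in a list (proof-side specification)
def lastOne? : List Int → Option Nat
  | [] => none
  | x :: xs =>
    match lastOne? xs with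
    | some j => some (j + 1)
    | none => if x = 1 then some 0 else none

lemma lastOne?_append_singleton (xs : List Int) (x : Int) :
    lastOne? (xs ++ [x]) = if x = 1 then some xs.length else lastOne? xs := by
  induction xs with
  | nil => simp [lastOne?]
  | cons y ys ih =>
    simp only [List.cons_append, lastOne?, ih]
    by_cases hx : x = 1
    · simp [hx]
    · simp only [hx, if_false]

lemma findfirstpos_aux (xs : List Int) :
    ∀ (a : Int) (ls : List Int), 0 ≤ a → xs = ls.drop a.toNat →
      (PySem.List.pyRange a (ls.length : Int) 1).findSome?
          (fun i => if PySem.List.pyGetD ls i 0 = 1 then some i else none)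
        = (firstOne? xs).map (fun j => a + (j : Int)) := by
  induction xs with
  | nil =>
    intro a ls ha hdrop
    have hlen : ls.length ≤ a.toNat := by
      by_contra h
      have := List.drop_eq_nil_iff.mp hdrop.symm
      omega
    rw [PySem.List.pyRange_one_eq_nil (by omega)]
    simp [firstOne?]
  | cons x xs ih =>
    intro a ls ha hdrop
    have hlt : a.toNat < ls.length := by
      by_contra h
      rw [List.drop_eq_nil_iff.mpr (by omega)] at hdrop
      simp at hdrop
    have hd := hdrop
    rw [List.drop_eq_getElem_cons hlt] at hd
    injection hd with hx' hxs'
    have hx : ls[a.toNat] = x := hx'.symm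
    rw [PySem.List.pyRange_one_cons (by omega)]
    have hget : PySem.List.pyGetD ls a 0 = x := by
      rw [PySem.List.pyGetD_eq_getElem ls 0 ha (by omega)]
      exact hx
    simp only [List.findSome?_cons, hget]
    by_cases h1 : x = 1
    · simp [h1, firstOne?]
    · have hdrop' : xs = ls.drop (a + 1).toNat := by
        rw [show (a + 1).toNat = a.toNat + 1 by omega]
        exact hxs'
      simp only [h1, if_false]
      rw [ih (a + 1) ls (by omega) hdrop']
      simp [firstOne?, h1, Function.comp]
      cases firstOne? xs <;> simp
      omega

lemma findlastpos_aux (ls : List Int) :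
    ∀ (n : Nat), n ≤ ls.length →
      (PySem.List.pyRange ((n : Int) - 1) (-1) (-1)).findSome?
          (fun i => if PySem.List.pyGetD ls i 0 = 1 then some i else none)
        = (lastOne? (ls.take n)).map (fun j => (j : Int)) := by
  intro n
  induction n with
  | zero =>
    intro _
    rw [PySem.List.pyRange_neg_one_eq_nil (by omega)]
    simp [lastOne?]
  | succ n ih =>
    intro hn
    have hlt : n < ls.length := by omega
    have hstep : ((n + 1 : Nat) : Int) - 1 = (n : Int) := by push_cast; ring
    rw [hstep, PySem.List.pyRange_neg_one_cons (by omega)]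
    have hget : PySem.List.pyGetD ls (n : Int) 0 = ls[n] := by
      rw [PySem.List.pyGetD_eq_getElem ls 0 (by exact_mod_cast (Nat.zero_le n)) (by exact_mod_cast hlt)]
      simp
    have htake : ls.take (n + 1) = ls.take n ++ [ls[n]] := by
      rw [List.take_add_one, List.getElem?_eq_getElem hlt]
      rfl
    rw [htake, lastOne?_append_singleton]
    simp only [List.findSome?_cons, hget]
    by_cases h1 : ls[n] = 1
    · simp [h1, List.length_take, Nat.min_eq_left (le_of_lt hlt)]
    · simp only [h1, if_false]
      have : (n : Int) - 1 = ((n : Nat) : Int) - 1 := rfl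
      rw [ih (by omega)]

-- characterization of A's helpers in terms of firstOne?/lastOne?
lemma findfirstpos_eq (ls : List Int) :
    findfirstpos ls = (firstOne? ls).map (fun j => (j : Int)) := by
  have := findfirstpos_aux ls 0 ls (by omega) (by simp)
  simpa [findfirstpos] using this

lemma findlastpos_eq (ls : List Int) :
    findlastpos ls = (lastOne? ls).map (fun j => (j : Int)) := by
  have := findlastpos_aux ls ls.length (le_refl _)
  simpa [findlastpos] using this

-- invariant of B's single enumerate pass
lemma bscan_spec (ls : List Int) :
    ∀ (k t : Int) (f l : Option Int),
      (PySem.List.enumerate ls k).foldl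
        (fun (st : Int × Option Int × Option Int) (ix : Int × Int) =>
          ( st.1 + ix.2,
            if ix.2 = 1 ∧ st.2.1 = none then some ix.1 else st.2.1,
            if ix.2 = 1 then some ix.1 else st.2.2 ))
        (t, f, l)
      = (t + ls.sum,
         f.or ((firstOne? ls).map (fun j => k + (j : Int))),
         ((lastOne? ls).map (fun j => k + (j : Int))).or l) := by
  induction ls with
  | nil => intro k t f l; simp [PySem.List.enumerate_nil, firstOne?, lastOne?]
  | cons x xs ih =>
    intro k t f l
    rw [PySem.List.enumerate_cons, List.foldl_cons]
    by_cases h1 : x = 1 <;> cases f <;>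
      cases hf : firstOne? xs <;> cases hl : lastOne? xs <;>
        simp [h1, ih, firstOne?, lastOne?, hf, hl, Option.or] <;> omega

-- the two per-row step functions agree (for every row, with .getD 0 standing in for None)
lemma row_step_eq (m : Int) (ls : List Int) :
    (if ls.sum ≠ 0 then
        let s := (findlastpos ls).getD 0 - (findfirstpos ls).getD 0 + 1
        if s > m then s else m
      else m)
    = (let st := (PySem.List.enumerate ls 0).foldl
        (fun (st : Int × Option Int × Option Int) (ix : Int × Int) =>
          ( st.1 + ix.2,
            if ix.2 = 1 ∧ st.2.1 = none then some ix.1 else st.2.1,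
            if ix.2 = 1 then some ix.1 else st.2.2 ))
        (0, none, none)
       if st.1 ≠ 0 then
        let s := st.2.2.getD 0 - st.2.1.getD 0 + 1
        if s > m then s else m
      else m) := by
  rw [bscan_spec ls 0 0 none none]
  simp [findfirstpos_eq, findlastpos_eq]

-- ===== VERDICT (by name: the statement is the Claim_ definition above) =====
theorem findlongesthorizontalside_spec : Claim_equal_findlongesthorizontalside := by
  intro lsols _ _
  unfold Spec_findlongesthorizontalside findlongesthorizontalside findlongesthorizontalside_alt
  exact List.foldl_ext _ _ 0 (fun m ls _ => row_step_eq m ls)
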